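-- pv_equiv track=rewrite | github.com/utb404/keira | test_generator/core/generator.py | _split_code_by_markers
-- ===== SOURCE A (Python) =====
-- def _split_code_by_markers(code: str) -> tuple[str, str, str]:
--     """
--     Разделяет код по маркерам === PAGE OBJECT === и === TEST FUNCTION ===.
--
--     Args:
--         code: Исходный код
--
--     Returns:
--         Кортеж (page_object_code, test_code, imports)
--     """
--     import re
--
--     lines = code.split("\n")
--     imports = []
--     page_object_lines = []
--     test_lines = []
--
--     in_page_section = False
--     in_test_section = False
--
--     for line in lines:
--         stripped = line.strip()
--
--         # Импорты (до разделителей)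
--         if not in_page_section and not in_test_section:
--             if stripped.startswith("import ") or stripped.startswith("from "):
--                 imports.append(line)
--                 continue
--             elif "=== PAGE OBJECT ===" in stripped:
--                 in_page_section = True
--                 in_test_section = False
--                 continue
--             elif "=== TEST FUNCTION ===" in stripped:
--                 in_page_section = False
--                 in_test_section = True
--                 continue
--
--         # Разделители
--         if "=== PAGE OBJECT ===" in stripped:
--             in_page_section = True
--             in_test_section = False
--             continue
--         elif "=== TEST FUNCTION ===" in stripped:
--             in_page_section = False
--             in_test_section = True
--             continue
--
--         # Добавление строк в соответствующие секции
--         if in_page_section: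
--             page_object_lines.append(line)
--         elif in_test_section:
--             test_lines.append(line)
--         elif not stripped.startswith("#") or "===" not in stripped:
--             # Импорты, которые могут быть после разделителей
--             if stripped.startswith("import ") or stripped.startswith("from "):
--                 imports.append(line)
--
--     imports_str = "\n".join(imports)
--     page_object_code = "\n".join(page_object_lines).strip()
--     test_code = "\n".join(test_lines).strip()
--
--     return page_object_code, test_code, imports_str
-- ===== SOURCE B (Python) =====
-- PAGE_MARKER = "=== PAGE OBJECT ==="
-- TEST_MARKER = "=== TEST FUNCTION ==="
--
--
-- def _is_import(line):
--     s = line.strip()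
--     return s.startswith("import ") or s.startswith("from ")
--
--
-- def _split_at_marker(lines):
--     """Return (prefix lines before the first marker, tag of that marker or None,
--     lines after it). An import-looking line stays in the prefix even if it
--     mentions a marker."""
--     prefix = []
--     for k, line in enumerate(lines):
--         if not _is_import(line):
--             s = line.strip()
--             if PAGE_MARKER in s:
--                 return prefix, "page", lines[k + 1:]
--             if TEST_MARKER in s:
--                 return prefix, "test", lines[k + 1:]
--         prefix.append(line)
--     return prefix, None, []
--
--
-- def _split_code_by_markers(code: str) -> tuple[str, str, str]:
--     lines = code.split("\n")
--     prefix, tag, rest = _split_at_marker(lines)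
--     imports = [l for l in prefix if _is_import(l)]
--     page, test = [], []
--     for line in rest:
--         s = line.strip()
--         if PAGE_MARKER in s:
--             tag = "page"
--         elif TEST_MARKER in s:
--             tag = "test"
--         elif tag == "page":
--             page.append(line)
--         else:
--             test.append(line)
--     return "\n".join(page).strip(), "\n".join(test).strip(), "\n".join(imports)
-- ===== Notes on version B (the rewrite author's own statement) =====
-- stated objective: simpler
-- what changed: Replaces A's single loop over three boolean-flag states (with a duplicated marker check and a dead post-marker import branch) by a different decomposition: split the lines once at the first marker line, filter the imports out of the prefix, then run a plain two-state loop over the tail.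
import Mathlib
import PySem

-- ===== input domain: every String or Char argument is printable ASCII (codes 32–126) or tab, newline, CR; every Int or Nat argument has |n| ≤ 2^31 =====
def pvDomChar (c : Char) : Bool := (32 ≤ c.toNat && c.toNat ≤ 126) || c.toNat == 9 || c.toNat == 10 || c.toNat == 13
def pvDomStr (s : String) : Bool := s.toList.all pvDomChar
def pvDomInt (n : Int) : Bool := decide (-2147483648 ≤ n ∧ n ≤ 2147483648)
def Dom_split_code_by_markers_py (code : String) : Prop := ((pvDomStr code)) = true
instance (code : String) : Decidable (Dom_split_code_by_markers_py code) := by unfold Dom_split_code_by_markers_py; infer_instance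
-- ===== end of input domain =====

-- B replaces A's three-flag single loop by a different decomposition: split the lines once
-- at the first marker, filter imports from the prefix, then a simple two-state loop over the
-- tail (objective: simpler; same cost).


-- both ports work on the `List Char` side of PySem.Str (exact; see PYSEM.md)

-- ===== PORT A =====
def pvPage : List Char := "=== PAGE OBJECT ===".toList
def pvTest : List Char := "=== TEST FUNCTION ===".toList

-- one iteration of A's for-loop; the nested `rest2` is the code after the first
-- (prefix-only) block, reached by fall-through
def pvAStep (st : Bool × Bool × List (List Char) × List (List Char) × List (List Char))
    (line : List Char) :
    Bool × Bool × List (List Char) × List (List Char) × List (List Char) :=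
  let (inP, inT, imps, pls, tls) := st
  let stripped := PySem.Chars.strip line
  let rest2 : Bool × Bool × List (List Char) × List (List Char) × List (List Char) :=
    if PySem.Chars.isIn pvPage stripped then (true, false, imps, pls, tls)
    else if PySem.Chars.isIn pvTest stripped then (false, true, imps, pls, tls)
    else if inP then (inP, inT, imps, pls ++ [line], tls)
    else if inT then (inP, inT, imps, pls, tls ++ [line])
    else if !(PySem.Chars.startswith stripped "#".toList) || !(PySem.Chars.isIn "===".toList stripped) then
      if PySem.Chars.startswith stripped "import ".toList || PySem.Chars.startswith stripped "from ".toList then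
        (inP, inT, imps ++ [line], pls, tls)
      else (inP, inT, imps, pls, tls)
    else (inP, inT, imps, pls, tls)
  if !inP && !inT then
    if PySem.Chars.startswith stripped "import ".toList || PySem.Chars.startswith stripped "from ".toList then
      (inP, inT, imps ++ [line], pls, tls)
    else if PySem.Chars.isIn pvPage stripped then (true, false, imps, pls, tls)
    else if PySem.Chars.isIn pvTest stripped then (false, true, imps, pls, tls)
    else rest2
  else rest2

def split_code_by_markers_py (code : String) : String × String × String :=
  let lines := PySem.Chars.splitOn code.toList "\n".toList
  let (_, _, imps, pls, tls) := lines.foldl pvAStep (false, false, [], [], [])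
  (String.ofList (PySem.Chars.strip (PySem.Chars.join "\n".toList pls)),
   String.ofList (PySem.Chars.strip (PySem.Chars.join "\n".toList tls)),
   String.ofList (PySem.Chars.join "\n".toList imps))

-- ===== PORT B =====
def pvBIsImport (line : List Char) : Bool :=
  let s := PySem.Chars.strip line
  PySem.Chars.startswith s "import ".toList || PySem.Chars.startswith s "from ".toList

-- _split_at_marker: prefix before the first marker line, the marker's tag
-- (some true = "page", some false = "test", none = no marker), lines after it
def pvBSplitAtMarker : List (List Char) →
    List (List Char) × Option Bool × List (List Char)
  | [] => ([], none, [])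
  | line :: rest =>
    if !pvBIsImport line && PySem.Chars.isIn pvPage (PySem.Chars.strip line) then
      ([], some true, rest)
    else if !pvBIsImport line && PySem.Chars.isIn pvTest (PySem.Chars.strip line) then
      ([], some false, rest)
    else
      let (p, t, r) := pvBSplitAtMarker rest
      (line :: p, t, r)

-- one iteration of B's for-loop over the tail
def pvBStep (st : Option Bool × List (List Char) × List (List Char)) (line : List Char) :
    Option Bool × List (List Char) × List (List Char) :=
  let (tag, pg, ts) := st
  let s := PySem.Chars.strip line
  if PySem.Chars.isIn pvPage s then (some true, pg, ts)
  else if PySem.Chars.isIn pvTest s then (some false, pg, ts)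
  else if tag == some true then (tag, pg ++ [line], ts)
  else (tag, pg, ts ++ [line])

def split_code_by_markers_py_alt (code : String) : String × String × String :=
  let lines := PySem.Chars.splitOn code.toList "\n".toList
  let (pre, tag, rest) := pvBSplitAtMarker lines
  let imports := pre.filter pvBIsImport
  let (_, pg, ts) := rest.foldl pvBStep (tag, [], [])
  (String.ofList (PySem.Chars.strip (PySem.Chars.join "\n".toList pg)),
   String.ofList (PySem.Chars.strip (PySem.Chars.join "\n".toList ts)),
   String.ofList (PySem.Chars.join "\n".toList imports))

-- ===== PRECONDITION & SPEC =====
def Spec_split_code_by_markers_py (code : String) (out : String × String × String) : Prop := out = split_code_by_markers_py_alt code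
instance (code : String) (out : String × String × String) : Decidable (Spec_split_code_by_markers_py code out) := by unfold Spec_split_code_by_markers_py; infer_instance

-- ===== CLAIM (what is proved, stated in full; the proofs are below) =====
def Claim_equal_split_code_by_markers_py : Prop := ∀ (code : String), Dom_split_code_by_markers_py code → Spec_split_code_by_markers_py code (split_code_by_markers_py code)

-- ===== LEMMAS AND PROOFS =====

-- A's loop in a section state (inP = tg, inT = !tg) runs like B's tail loop with tag = some tg,
-- leaving the imports untouched
theorem pvSectionLoop (rest : List (List Char)) (tg : Bool)
    (imps pls tls : List (List Char)) :
    rest.foldl pvBStep (some tg, pls, tls) =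
      (some (rest.foldl pvAStep (tg, !tg, imps, pls, tls)).1,
       (rest.foldl pvAStep (tg, !tg, imps, pls, tls)).2.2.2.1,
       (rest.foldl pvAStep (tg, !tg, imps, pls, tls)).2.2.2.2) ∧
    (rest.foldl pvAStep (tg, !tg, imps, pls, tls)).2.1
      = !(rest.foldl pvAStep (tg, !tg, imps, pls, tls)).1 ∧
    (rest.foldl pvAStep (tg, !tg, imps, pls, tls)).2.2.1 = imps := by
  induction rest generalizing tg pls tls with
  | nil => simp
  | cons l r ih =>
    simp only [List.foldl]
    by_cases h1 : PySem.Chars.isIn pvPage (PySem.Chars.strip l) = true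
    · have hA : pvAStep (tg, !tg, imps, pls, tls) l = (true, false, imps, pls, tls) := by
        cases tg <;> simp [pvAStep, h1]
      have hB : pvBStep (some tg, pls, tls) l = (some true, pls, tls) := by
        simp [pvBStep, h1]
      rw [hA, hB]
      simpa using ih true pls tls
    · by_cases h2 : PySem.Chars.isIn pvTest (PySem.Chars.strip l) = true
      · have hA : pvAStep (tg, !tg, imps, pls, tls) l = (false, true, imps, pls, tls) := by
          cases tg <;> simp [pvAStep, h1, h2]
        have hB : pvBStep (some tg, pls, tls) l = (some false, pls, tls) := by
          simp [pvBStep, h1, h2]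
        rw [hA, hB]
        simpa using ih false pls tls
      · cases tg
        · have hA : pvAStep (false, !false, imps, pls, tls) l = (false, true, imps, pls, tls ++ [l]) := by
            simp [pvAStep, h1, h2]
          have hB : pvBStep (some false, pls, tls) l = (some false, pls, tls ++ [l]) := by
            simp [pvBStep, h1, h2]
          rw [hA, hB]
          simpa using ih false pls (tls ++ [l])
        · have hA : pvAStep (true, !true, imps, pls, tls) l = (true, false, imps, pls ++ [l], tls) := by
            simp [pvAStep, h1, h2]
          have hB : pvBStep (some true, pls, tls) l = (some true, pls ++ [l], tls) := by
            simp [pvBStep, h1, h2]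
          rw [hA, hB]
          simpa using ih true (pls ++ [l]) tls

-- A's loop from the neutral state, described through B's split of the lines at the first marker
theorem pvPrefixLoop (lines : List (List Char)) (imps pls tls : List (List Char)) :
    lines.foldl pvAStep (false, false, imps, pls, tls) =
      (match pvBSplitAtMarker lines with
       | (pre, none, _) => (false, false, imps ++ pre.filter pvBIsImport, pls, tls)
       | (pre, some tg, rest) =>
         rest.foldl pvAStep (tg, !tg, imps ++ pre.filter pvBIsImport, pls, tls)) := by
  induction lines generalizing imps with
  | nil => simp [pvBSplitAtMarker]
  | cons l ls ih =>
    simp only [List.foldl]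
    by_cases hi : pvBIsImport l = true
    · have hi' : PySem.Chars.startswith (PySem.Chars.strip l) ['i','m','p','o','r','t',' '] = true
          ∨ PySem.Chars.startswith (PySem.Chars.strip l) ['f','r','o','m',' '] = true := by
        simpa [pvBIsImport] using hi
      have hA : pvAStep (false, false, imps, pls, tls) l = (false, false, imps ++ [l], pls, tls) := by
        rcases hi' with h | h <;> simp [pvAStep, h]
      rw [hA, ih]
      rcases h : pvBSplitAtMarker ls with ⟨p, t, r⟩
      cases t <;> simp [pvBSplitAtMarker, hi, h, List.filter, List.append_assoc]
    · have hi' : PySem.Chars.startswith (PySem.Chars.strip l) ['i','m','p','o','r','t',' '] = false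
          ∧ PySem.Chars.startswith (PySem.Chars.strip l) ['f','r','o','m',' '] = false := by
        simpa [pvBIsImport] using hi
      by_cases h1 : PySem.Chars.isIn pvPage (PySem.Chars.strip l) = true
      · have hA : pvAStep (false, false, imps, pls, tls) l = (true, false, imps, pls, tls) := by
          simp [pvAStep, hi'.1, hi'.2, h1]
        rw [hA]
        simp [pvBSplitAtMarker, hi, h1]
      · by_cases h2 : PySem.Chars.isIn pvTest (PySem.Chars.strip l) = true
        · have hA : pvAStep (false, false, imps, pls, tls) l = (false, true, imps, pls, tls) := by
            simp [pvAStep, hi'.1, hi'.2, h1, h2]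
          rw [hA]
          simp [pvBSplitAtMarker, hi, h1, h2]
        · have hA : pvAStep (false, false, imps, pls, tls) l = (false, false, imps, pls, tls) := by
            simp [pvAStep, hi'.1, hi'.2, h1, h2]
          rw [hA, ih]
          rcases h : pvBSplitAtMarker ls with ⟨p, t, r⟩
          cases t <;> simp [pvBSplitAtMarker, hi, h1, h2, h, List.filter]

-- if no marker is found the remainder returned by the split is empty
theorem pvSplit_none_rest (lines : List (List Char))
    (h : (pvBSplitAtMarker lines).2.1 = none) : (pvBSplitAtMarker lines).2.2 = [] := by
  induction lines with
  | nil => simp [pvBSplitAtMarker]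
  | cons l ls ih =>
    simp only [pvBSplitAtMarker] at h ⊢
    split_ifs at h ⊢ with hc1 hc2
    exact ih h

-- ===== VERDICT (by name: the statement is the Claim_ definition above) =====
theorem split_code_by_markers_py_spec : Claim_equal_split_code_by_markers_py := by
  intro code _
  unfold Spec_split_code_by_markers_py split_code_by_markers_py split_code_by_markers_py_alt
  simp only
  rcases h : pvBSplitAtMarker (PySem.Chars.splitOn code.toList "\n".toList) with ⟨pre, tag, rest⟩
  rw [pvPrefixLoop (PySem.Chars.splitOn code.toList "\n".toList) [] [] [], h]
  cases tag with
  | none =>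
    have hr : rest = [] := by
      have := pvSplit_none_rest (PySem.Chars.splitOn code.toList "\n".toList)
      rw [h] at this
      exact this rfl
    subst hr
    simp
  | some tg =>
    obtain ⟨hB, _, himps⟩ := pvSectionLoop rest tg (List.filter pvBIsImport pre) [] []
    simp only [List.nil_append]
    rw [hB]
    simp [himps]
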